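-- pv_equiv track=rewrite | github.com/BryanCandido/H24115069- | HW5_3.py | calculate_max_year_gap
-- ===== SOURCE A (Python) =====
-- def calculate_max_year_gap(years):
--     max_gap = 0
--     years.sort()
--     for i in range(1, len(years)):
--         gap = years[i] - years[i-1]
--         if gap > max_gap:
--             max_gap = gap
--     return max_gap
-- ===== SOURCE B (Python) =====
-- def _go(xs, lo, hi):
--     # max adjacent gap of sorted(xs), where every x in xs satisfies lo <= x <= hi
--     if lo >= hi:
--         return 0
--     mid = (lo + hi) // 2
--     left = [x for x in xs if x <= mid]
--     right = [x for x in xs if x > mid]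
--     if not left:
--         return _go(right, mid + 1, hi)
--     if not right:
--         return _go(left, lo, mid)
--     return max(_go(left, lo, mid), _go(right, mid + 1, hi), min(right) - max(left))
--
--
-- def calculate_max_year_gap(years):
--     # Divide and conquer on the VALUE RANGE (no sorting, no mutation of the input):
--     # split the range at its midpoint, recurse on both halves, and account for the
--     # one sorted-adjacent gap that crosses the split point.
--     if not years:
--         return 0
--     return _go(years, min(years), max(years))
-- ===== Notes on version B (the rewrite author's own statement) =====
-- stated objective: alternative
-- what changed: Replaces sort-then-adjacent-scan by a sort-free divide-and-conquer on the value range: split the range at its midpoint, partition the elements, recurse on both halves and take the crossing gap min(right)-max(left) into the maximum.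
import Mathlib
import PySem

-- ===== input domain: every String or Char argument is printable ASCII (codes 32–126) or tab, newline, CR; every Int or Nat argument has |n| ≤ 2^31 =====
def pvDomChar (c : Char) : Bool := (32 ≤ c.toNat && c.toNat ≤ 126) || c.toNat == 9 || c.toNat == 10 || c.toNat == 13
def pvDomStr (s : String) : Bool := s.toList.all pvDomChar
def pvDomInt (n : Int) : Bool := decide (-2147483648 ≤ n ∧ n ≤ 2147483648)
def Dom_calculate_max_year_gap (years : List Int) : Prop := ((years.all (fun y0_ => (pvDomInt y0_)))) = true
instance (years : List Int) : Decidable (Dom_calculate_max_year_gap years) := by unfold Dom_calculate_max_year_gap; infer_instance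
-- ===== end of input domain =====

-- B replaces sort-then-adjacent-scan by a sort-free divide-and-conquer on the value range
-- (alternative algorithm, not claimed faster). A sorts its argument in place; the equivalence
-- proved is about the RETURN value only (B does not mutate its argument).

-- ===== PORT A =====
def calculate_max_year_gap (years : List Int) : Int :=
  -- max_gap = 0; years.sort(); for i in range(1, len(years)): gap = years[i] - years[i-1]; …
  let s := PySem.List.sorted years (fun x => x) false
  (PySem.List.pyRange 1 (s.length : Int) 1).foldl
    (fun max_gap i =>
      let gap := PySem.List.pyGetD s i 0 - PySem.List.pyGetD s (i - 1) 0
      if gap > max_gap then gap else max_gap) 0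

-- ===== PORT B =====
-- termination facts for pvGoB (cited by name in decreasing_by)
lemma pvGoB_decL (lo hi : Int) (h : ¬ hi ≤ lo) :
    (PySem.Int.floordiv (lo + hi) 2 - lo).toNat < (hi - lo).toNat := by
  have hb := PySem.Int.floordiv_two_mid_bounds (lo := lo) (hi := hi) (by omega)
  have hlt : PySem.Int.floordiv (lo + hi) 2 < hi := by
    rw [PySem.Int.floordiv_lt_iff_lt_mul (by omega)]
    omega
  omega

lemma pvGoB_decR (lo hi : Int) (h : ¬ hi ≤ lo) :
    (hi - (PySem.Int.floordiv (lo + hi) 2 + 1)).toNat < (hi - lo).toNat := by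
  have hb := PySem.Int.floordiv_two_mid_bounds (lo := lo) (hi := hi) (by omega)
  omega

-- helper for B: port of _go in Source B (divide and conquer on the value range)
def pvGoB (xs : List Int) (lo hi : Int) : Int :=
  if _hcmp : hi ≤ lo then 0
  else
    let mid := PySem.Int.floordiv (lo + hi) 2
    let left := xs.filter (fun x => decide (x ≤ mid))
    let right := xs.filter (fun x => decide (x > mid))
    if left = [] then pvGoB right (mid + 1) hi
    else if right = [] then pvGoB left lo mid
    else
      -- in this branch left ≠ [] and right ≠ [], so Python's min(right)/max(left)
      -- return normally; min?/max? are `some` here and `.getD 0` is exact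
      max (max (pvGoB left lo mid) (pvGoB right (mid + 1) hi))
        ((PySem.List.min? right (fun z => z)).getD 0 - (PySem.List.max? left (fun z => z)).getD 0)
termination_by (hi - lo).toNat
decreasing_by
  all_goals first
    | exact pvGoB_decL lo hi _hcmp
    | exact pvGoB_decR lo hi _hcmp

def calculate_max_year_gap_alt (years : List Int) : Int :=
  if years = [] then 0
  else
    -- years ≠ [] here, so Python's min(years)/max(years) return normally;
    -- min?/max? are `some` here and `.getD 0` is exact
    pvGoB years ((PySem.List.min? years (fun z => z)).getD 0)
      ((PySem.List.max? years (fun z => z)).getD 0)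

-- ===== PRECONDITION & SPEC =====
def Spec_calculate_max_year_gap (years : List Int) (out : Int) : Prop := out = calculate_max_year_gap_alt years
instance (years : List Int) (out : Int) : Decidable (Spec_calculate_max_year_gap years out) := by unfold Spec_calculate_max_year_gap; infer_instance

-- ===== CLAIM (what is proved, stated in full; the proofs are below) =====
def Claim_equal_calculate_max_year_gap : Prop := ∀ (years : List Int), Dom_calculate_max_year_gap years → Spec_calculate_max_year_gap years (calculate_max_year_gap years)

-- ===== LEMMAS AND PROOFS =====

-- the list of adjacent differences of s (A maximises these after sorting)
def pvDiffs (s : List Int) : List Int := List.zipWith (fun b c => b - c) s.tail s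

-- "m is the least element of s strictly above x"
def pvMinAbove (s : List Int) (x m : Int) : Prop :=
  m ∈ s ∧ x < m ∧ ∀ y ∈ s, x < y → m ≤ y

lemma pvIteMax (a g : Int) : (if g > a then g else a) = max a g := by
  rw [max_def]; split_ifs <;> omega

-- characterisation of A's running-max loop
lemma pvFoldMax_le_iff : ∀ (l : List Int) (a d : Int),
    (l.foldl (fun mg g => if g > mg then g else mg) a ≤ d) ↔ (a ≤ d ∧ ∀ g ∈ l, g ≤ d) := by
  intro l
  induction l with
  | nil => intro a d; simp
  | cons g l ih =>
    intro a d
    simp only [List.foldl_cons]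
    rw [ih]
    constructor
    · rintro ⟨h1, h2⟩
      rw [pvIteMax, max_le_iff] at h1
      exact ⟨h1.1, List.forall_mem_cons.mpr ⟨h1.2, h2⟩⟩
    · rintro ⟨h1, h2⟩
      rcases List.forall_mem_cons.mp h2 with ⟨hg, hl⟩
      exact ⟨by rw [pvIteMax, max_le_iff]; exact ⟨h1, hg⟩, hl⟩

-- A's index loop is the fold of the running max over pvDiffs of the sorted list
lemma pvA_fold_nat : ∀ (s : List Int) (a : Int),
    (List.range (s.length - 1)).foldl
      (fun mg k => if s.getD (k+1) 0 - s.getD k 0 > mg then s.getD (k+1) 0 - s.getD k 0 else mg) a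
    = (pvDiffs s).foldl (fun mg g => if g > mg then g else mg) a := by
  intro s
  induction s with
  | nil => intro a; simp [pvDiffs]
  | cons x s ih =>
    intro a
    cases s with
    | nil => simp [pvDiffs]
    | cons y t =>
      have hlen : (x :: y :: t).length - 1 = t.length + 1 := by simp
      rw [hlen, List.range_succ_eq_map, List.foldl_cons, List.foldl_map]
      rw [show pvDiffs (x :: y :: t) = (y - x) :: pvDiffs (y :: t) from rfl, List.foldl_cons]
      have hlen2 : (y :: t).length - 1 = t.length := by simp
      have h := ih (if y - x > a then y - x else a)
      rw [hlen2] at h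
      refine Eq.trans (List.foldl_ext _ _ _ ?_) h
      intro mg k hk
      simp

lemma pvA_eq (years : List Int) :
    calculate_max_year_gap years
    = (pvDiffs (PySem.List.sorted years (fun x => x) false)).foldl
        (fun mg g => if g > mg then g else mg) 0 := by
  have hdef : calculate_max_year_gap years
      = (PySem.List.pyRange 1 ((PySem.List.sorted years (fun x => x) false).length : Int) 1).foldl
          (fun max_gap i =>
            let gap := PySem.List.pyGetD (PySem.List.sorted years (fun x => x) false) i 0
              - PySem.List.pyGetD (PySem.List.sorted years (fun x => x) false) (i - 1) 0
            if gap > max_gap then gap else max_gap) 0 := rfl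
  rw [hdef]
  generalize PySem.List.sorted years (fun x => x) false = s
  rw [PySem.List.pyRange_one, List.foldl_map]
  rw [show (((s.length : Int)) - 1).toNat = s.length - 1 from by omega]
  refine Eq.trans (List.foldl_ext _ _ _ ?_) (pvA_fold_nat s 0)
  intro mg k hk
  have h1 : (1 : Int) + (k : Nat) = ((k + 1 : Nat) : Int) := by push_cast; ring
  have h2 : ((k + 1 : Nat) : Int) - 1 = ((k : Nat) : Int) := by push_cast; ring
  simp only [h1, h2, PySem.List.pyGetD_natCast]

-- the combinatorial heart: on a sorted list, bounding all adjacent differences by a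
-- nonnegative d is the same as bounding all successor gaps by d
lemma pvKey : ∀ (s : List Int), s.Pairwise (· ≤ ·) → ∀ d : Int, 0 ≤ d →
    ((∀ g ∈ pvDiffs s, g ≤ d) ↔ (∀ x ∈ s, ∀ m, pvMinAbove s x m → m - x ≤ d)) := by
  intro s
  induction s with
  | nil => intro _ d hd; simp [pvDiffs, pvMinAbove]
  | cons a s ih =>
    intro hp d hd
    cases s with
    | nil =>
      constructor
      · rintro _ x hx m hm
        rcases List.mem_cons.mp hx with heq | hx'
        · subst heq
          rcases hm with ⟨hm1, hm2, _⟩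
          rcases List.mem_cons.mp hm1 with heq2 | h
          · omega
          · cases h
        · cases hx'
      · intro _ g hg
        simp [pvDiffs] at hg
    | cons b t =>
      rcases List.pairwise_cons.mp hp with ⟨ha, hp'⟩
      have hab : a ≤ b := ha b (by simp)
      have hbz : ∀ z ∈ b :: t, b ≤ z := by
        intro z hz
        rcases List.mem_cons.mp hz with rfl | hz'
        · omega
        · exact (List.pairwise_cons.mp hp').1 z hz'
      have IH := ih hp' d hd
      have hsub : ∀ x ∈ b :: t, ∀ m, (pvMinAbove (a :: b :: t) x m ↔ pvMinAbove (b :: t) x m) := by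
        intro x hx m
        have hbx : b ≤ x := hbz x hx
        constructor
        · rintro ⟨hm1, hm2, hm3⟩
          refine ⟨?_, hm2, fun y hy hxy => hm3 y (List.mem_cons_of_mem _ hy) hxy⟩
          rcases List.mem_cons.mp hm1 with rfl | h
          · omega
          · exact h
        · rintro ⟨hm1, hm2, hm3⟩
          refine ⟨List.mem_cons_of_mem _ hm1, hm2, fun y hy hxy => ?_⟩
          rcases List.mem_cons.mp hy with rfl | h
          · omega
          · exact hm3 y h hxy
      have hdiffs : pvDiffs (a :: b :: t) = (b - a) :: pvDiffs (b :: t) := rfl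
      constructor
      · intro hL x hx m hm
        have hL' : ∀ g ∈ pvDiffs (b :: t), g ≤ d := fun g hg => hL g (by rw [hdiffs]; exact List.mem_cons_of_mem _ hg)
        rcases List.mem_cons.mp hx with heq | hx'
        · subst heq
          by_cases hlt : x < b
          · have hmb : m = b := by
              rcases hm with ⟨hm1, hm2, hm3⟩
              have h1 : m ≤ b := hm3 b (by simp) hlt
              have h2 : b ≤ m := by
                rcases List.mem_cons.mp hm1 with heq2 | h
                · omega
                · exact hbz m h
              omega
            have hba : b - x ≤ d := hL (b - x) (by rw [hdiffs]; simp)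
            omega
          · have heq2 : x = b := by omega
            have hm' : pvMinAbove (b :: t) b m := by
              rcases hm with ⟨hm1, hm2, hm3⟩
              refine ⟨?_, by omega, fun y hy hby => hm3 y (List.mem_cons_of_mem _ hy) (by omega)⟩
              rcases List.mem_cons.mp hm1 with heq3 | h
              · exact absurd heq3 (by omega)
              · exact h
            have := (IH.mp hL') b (by simp) m hm'
            omega
        · exact (IH.mp hL') x hx' m ((hsub x hx' m).mp hm)
      · intro hR g hg
        rw [hdiffs] at hg
        rcases List.mem_cons.mp hg with rfl | hg'
        · by_cases hlt : a < b
          · have hma : pvMinAbove (a :: b :: t) a b := by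
              refine ⟨by simp, hlt, fun y hy hay => ?_⟩
              rcases List.mem_cons.mp hy with rfl | h
              · omega
              · exact hbz y h
            have := hR a (by simp) b hma
            omega
          · omega
        · refine (IH.mpr ?_) g hg'
          intro x hx m hm
          exact hR x (List.mem_cons_of_mem _ hx) m ((hsub x hx m).mpr hm)

lemma pvMinAbove_congr {l1 l2 : List Int} (h : ∀ z : Int, z ∈ l1 ↔ z ∈ l2) (x m : Int) :
    pvMinAbove l1 x m ↔ pvMinAbove l2 x m := by
  constructor <;> rintro ⟨h1, h2, h3⟩
  · exact ⟨(h m).mp h1, h2, fun y hy hxy => h3 y ((h y).mpr hy) hxy⟩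
  · exact ⟨(h m).mpr h1, h2, fun y hy hxy => h3 y ((h y).mp hy) hxy⟩

-- one-step unfolding of pvGoB, with the local bindings inlined
lemma pvGoB_eq (xs : List Int) (lo hi : Int) : pvGoB xs lo hi =
    if _hcmp : hi ≤ lo then 0
    else
      if xs.filter (fun x => decide (x ≤ PySem.Int.floordiv (lo + hi) 2)) = [] then
        pvGoB (xs.filter (fun x => decide (x > PySem.Int.floordiv (lo + hi) 2)))
          (PySem.Int.floordiv (lo + hi) 2 + 1) hi
      else if xs.filter (fun x => decide (x > PySem.Int.floordiv (lo + hi) 2)) = [] then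
        pvGoB (xs.filter (fun x => decide (x ≤ PySem.Int.floordiv (lo + hi) 2))) lo
          (PySem.Int.floordiv (lo + hi) 2)
      else
        max
          (max
            (pvGoB (xs.filter (fun x => decide (x ≤ PySem.Int.floordiv (lo + hi) 2))) lo
              (PySem.Int.floordiv (lo + hi) 2))
            (pvGoB (xs.filter (fun x => decide (x > PySem.Int.floordiv (lo + hi) 2)))
              (PySem.Int.floordiv (lo + hi) 2 + 1) hi))
          ((PySem.List.min? (xs.filter (fun x => decide (x > PySem.Int.floordiv (lo + hi) 2))) (fun z => z)).getD 0
            - (PySem.List.max? (xs.filter (fun x => decide (x ≤ PySem.Int.floordiv (lo + hi) 2))) (fun z => z)).getD 0) := by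
  rw [pvGoB]

-- pvGoB computes exactly the bound "every successor gap of xs is ≤ d", for elements known
-- to lie in [lo, hi]
lemma pvGo_le_iff : ∀ (n : Nat) (xs : List Int) (lo hi : Int), (hi - lo).toNat ≤ n →
    (∀ x ∈ xs, lo ≤ x ∧ x ≤ hi) → ∀ d : Int,
    (pvGoB xs lo hi ≤ d ↔ (0 ≤ d ∧ ∀ x ∈ xs, ∀ m, pvMinAbove xs x m → m - x ≤ d)) := by
  intro n
  induction n with
  | zero =>
    intro xs lo hi hn hbound d
    have hle : hi ≤ lo := by omega
    rw [pvGoB_eq, dif_pos hle]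
    constructor
    · intro h0
      refine ⟨h0, ?_⟩
      rintro x hx m ⟨hm1, hm2, _⟩
      have h1 := hbound x hx
      have h2 := hbound m hm1
      omega
    · intro h
      exact h.1
  | succ n ih =>
    intro xs lo hi hn hbound d
    by_cases hle : hi ≤ lo
    · rw [pvGoB_eq, dif_pos hle]
      constructor
      · intro h0
        refine ⟨h0, ?_⟩
        rintro x hx m ⟨hm1, hm2, _⟩
        have h1 := hbound x hx
        have h2 := hbound m hm1
        omega
      · intro h
        exact h.1
    · rw [pvGoB_eq, dif_neg hle]
      set mid := PySem.Int.floordiv (lo + hi) 2 with hmid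
      have hmlo : lo ≤ mid := (PySem.Int.floordiv_two_mid_bounds (lo := lo) (hi := hi) (by omega)).1
      have hmhi : mid < hi := by
        rw [hmid, PySem.Int.floordiv_lt_iff_lt_mul (by omega)]
        omega
      set left := xs.filter (fun x => decide (x ≤ mid)) with hleft
      set right := xs.filter (fun x => decide (x > mid)) with hright
      have hmemL : ∀ z : Int, z ∈ left ↔ z ∈ xs ∧ z ≤ mid := by
        intro z; rw [hleft]; simp
      have hmemR : ∀ z : Int, z ∈ right ↔ z ∈ xs ∧ mid < z := by
        intro z; rw [hright]; simp
      have hsplit : ∀ z ∈ xs, z ∈ left ∨ z ∈ right := by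
        intro z hz
        by_cases h : z ≤ mid
        · exact Or.inl ((hmemL z).mpr ⟨hz, h⟩)
        · exact Or.inr ((hmemR z).mpr ⟨hz, by omega⟩)
      have hnL : (mid - lo).toNat ≤ n := by omega
      have hnR : (hi - (mid + 1)).toNat ≤ n := by omega
      have hbL : ∀ x ∈ left, lo ≤ x ∧ x ≤ mid := by
        intro x hx
        have h := (hmemL x).mp hx
        exact ⟨(hbound x h.1).1, h.2⟩
      have hbR : ∀ x ∈ right, mid + 1 ≤ x ∧ x ≤ hi := by
        intro x hx
        have h := (hmemR x).mp hx
        exact ⟨by omega, (hbound x h.1).2⟩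
      by_cases hL : left = []
      · rw [if_pos hL]
        have hxR : ∀ z : Int, z ∈ xs ↔ z ∈ right := by
          intro z
          constructor
          · intro hz
            rcases hsplit z hz with h | h
            · rw [hL] at h; cases h
            · exact h
          · intro hz
            exact ((hmemR z).mp hz).1
        rw [ih right (mid + 1) hi hnR hbR d]
        constructor
        · rintro ⟨h0, hall⟩
          exact ⟨h0, fun x hx m hm => hall x ((hxR x).mp hx) m
            ((pvMinAbove_congr hxR x m).mp hm)⟩
        · rintro ⟨h0, hall⟩
          exact ⟨h0, fun x hx m hm => hall x ((hxR x).mpr hx) m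
            ((pvMinAbove_congr hxR x m).mpr hm)⟩
      · by_cases hR : right = []
        · rw [if_neg hL, if_pos hR]
          have hxL : ∀ z : Int, z ∈ xs ↔ z ∈ left := by
            intro z
            constructor
            · intro hz
              rcases hsplit z hz with h | h
              · exact h
              · rw [hR] at h; cases h
            · intro hz
              exact ((hmemL z).mp hz).1
          rw [ih left lo mid hnL hbL d]
          constructor
          · rintro ⟨h0, hall⟩
            exact ⟨h0, fun x hx m hm => hall x ((hxL x).mp hx) m
              ((pvMinAbove_congr hxL x m).mp hm)⟩
          · rintro ⟨h0, hall⟩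
            exact ⟨h0, fun x hx m hm => hall x ((hxL x).mpr hx) m
              ((pvMinAbove_congr hxL x m).mpr hm)⟩
        · rw [if_neg hL, if_neg hR]
          obtain ⟨ml, hml⟩ : ∃ ml, PySem.List.max? left (fun z => z) = some ml := by
            cases h : PySem.List.max? left (fun z => z) with
            | none => exact absurd ((PySem.List.max?_eq_none_iff _ _).mp h) hL
            | some v => exact ⟨v, rfl⟩
          obtain ⟨mr, hmr⟩ : ∃ mr, PySem.List.min? right (fun z => z) = some mr := by
            cases h : PySem.List.min? right (fun z => z) with
            | none => exact absurd ((PySem.List.min?_eq_none_iff _ _).mp h) hR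
            | some v => exact ⟨v, rfl⟩
          rw [hml, hmr]
          simp only [Option.getD_some]
          have hmlL : ml ∈ left := PySem.List.max?_mem hml
          have hmlmax : ∀ y ∈ left, y ≤ ml := by
            have h := PySem.List.max?_isMax hml
            simpa using h
          have hmrR : mr ∈ right := PySem.List.min?_mem hmr
          have hmrmin : ∀ y ∈ right, mr ≤ y := by
            have h := PySem.List.min?_isMin hmr
            simpa using h
          rw [max_le_iff, max_le_iff, ih left lo mid hnL hbL d, ih right (mid + 1) hi hnR hbR d]
          constructor
          · rintro ⟨⟨⟨h0, hAl⟩, ⟨_, hAr⟩⟩, hcr⟩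
            refine ⟨h0, ?_⟩
            rintro x hx m ⟨hm1, hm2, hm3⟩
            rcases hsplit x hx with hxl | hxr
            · by_cases hmmid : m ≤ mid
              · refine hAl x hxl m ⟨(hmemL m).mpr ⟨hm1, hmmid⟩, hm2, ?_⟩
                intro y hy hxy
                exact hm3 y ((hmemL y).mp hy).1 hxy
              · have hxmid : x ≤ mid := ((hmemL x).mp hxl).2
                have hmlmid : ml ≤ mid := ((hmemL ml).mp hmlL).2
                have hxml : ml = x := by
                  have h1 : x ≤ ml := hmlmax x hxl
                  by_contra hne
                  have h2 := hm3 ml ((hmemL ml).mp hmlL).1 (by omega)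
                  omega
                have hmmr : m = mr := by
                  have h1 : mr ≤ m := hmrmin m ((hmemR m).mpr ⟨hm1, by omega⟩)
                  have hmrmid : mid < mr := ((hmemR mr).mp hmrR).2
                  have h2 : m ≤ mr := hm3 mr ((hmemR mr).mp hmrR).1 (by omega)
                  omega
                omega
            · refine hAr x hxr m ⟨?_, hm2, ?_⟩
              · have hxmid : mid < x := ((hmemR x).mp hxr).2
                exact (hmemR m).mpr ⟨hm1, by omega⟩
              · intro y hy hxy
                exact hm3 y ((hmemR y).mp hy).1 hxy
          · rintro ⟨h0, hall⟩
            refine ⟨⟨⟨h0, ?_⟩, ⟨h0, ?_⟩⟩, ?_⟩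
            · rintro x hxl m ⟨hm1, hm2, hm3⟩
              refine hall x ((hmemL x).mp hxl).1 m ⟨((hmemL m).mp hm1).1, hm2, ?_⟩
              intro y hy hxy
              rcases hsplit y hy with hyl | hyr
              · exact hm3 y hyl hxy
              · have h1 : m ≤ mid := ((hmemL m).mp hm1).2
                have h2 : mid < y := ((hmemR y).mp hyr).2
                omega
            · rintro x hxr m ⟨hm1, hm2, hm3⟩
              refine hall x ((hmemR x).mp hxr).1 m ⟨((hmemR m).mp hm1).1, hm2, ?_⟩
              intro y hy hxy
              rcases hsplit y hy with hyl | hyr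
              · have h1 : y ≤ mid := ((hmemL y).mp hyl).2
                have h2 : mid < x := ((hmemR x).mp hxr).2
                omega
              · exact hm3 y hyr hxy
            · refine hall ml ((hmemL ml).mp hmlL).1 mr ⟨((hmemR mr).mp hmrR).1, ?_, ?_⟩
              · have h1 : ml ≤ mid := ((hmemL ml).mp hmlL).2
                have h2 : mid < mr := ((hmemR mr).mp hmrR).2
                omega
              · intro y hy hly
                rcases hsplit y hy with hyl | hyr
                · have h1 := hmlmax y hyl
                  omega
                · exact hmrmin y hyr

-- ===== VERDICT (by name: the statement is the Claim_ definition above) =====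
theorem calculate_max_year_gap_spec : Claim_equal_calculate_max_year_gap := by
  intro years _
  unfold Spec_calculate_max_year_gap
  by_cases hne : years = []
  · subst hne
    decide
  · have hperm : (PySem.List.sorted years (fun x => x) false).Perm years :=
      PySem.List.sorted_perm years (fun x => x) false
    have hmem : ∀ z : Int, z ∈ PySem.List.sorted years (fun x => x) false ↔ z ∈ years :=
      fun z => hperm.mem_iff
    have hpair : (PySem.List.sorted years (fun x => x) false).Pairwise (· ≤ ·) := by
      simpa using PySem.List.sorted_pairwise years (fun x => x)
    obtain ⟨lo, hlo⟩ : ∃ lo, PySem.List.min? years (fun z => z) = some lo := by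
      cases h : PySem.List.min? years (fun z => z) with
      | none => exact absurd ((PySem.List.min?_eq_none_iff _ _).mp h) hne
      | some v => exact ⟨v, rfl⟩
    obtain ⟨hi, hhi⟩ : ∃ hi, PySem.List.max? years (fun z => z) = some hi := by
      cases h : PySem.List.max? years (fun z => z) with
      | none => exact absurd ((PySem.List.max?_eq_none_iff _ _).mp h) hne
      | some v => exact ⟨v, rfl⟩
    have halt : calculate_max_year_gap_alt years = pvGoB years lo hi := by
      unfold calculate_max_year_gap_alt
      rw [if_neg hne, hlo, hhi]
      simp only [Option.getD_some]
    have hbound : ∀ x ∈ years, lo ≤ x ∧ x ≤ hi := by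
      intro x hx
      constructor
      · have h := PySem.List.min?_isMin hlo
        simpa using h x hx
      · have h := PySem.List.max?_isMax hhi
        simpa using h x hx
    have hgo := fun d => pvGo_le_iff (hi - lo).toNat years lo hi le_rfl hbound d
    rw [pvA_eq, halt]
    have hAiff : ∀ d : Int,
        ((pvDiffs (PySem.List.sorted years (fun x => x) false)).foldl
            (fun mg g => if g > mg then g else mg) 0 ≤ d
          ↔ (0 ≤ d ∧ ∀ x ∈ years, ∀ m, pvMinAbove years x m → m - x ≤ d)) := by
      intro d
      rw [pvFoldMax_le_iff]
      constructor
      · rintro ⟨h0, hall⟩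
        refine ⟨h0, ?_⟩
        intro x hx m hm
        exact (pvKey _ hpair d h0).mp hall x ((hmem x).mpr hx) m
          ((pvMinAbove_congr hmem x m).mpr hm)
      · rintro ⟨h0, hall⟩
        refine ⟨h0, (pvKey _ hpair d h0).mpr ?_⟩
        intro x hx m hm
        exact hall x ((hmem x).mp hx) m ((pvMinAbove_congr hmem x m).mp hm)
    apply le_antisymm
    · exact (hAiff _).mpr ((hgo _).mp le_rfl)
    · exact (hgo _).mpr ((hAiff _).mp le_rfl)
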